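-- pv_equiv track=rewrite | github.com/crississipi/smartspecs | scripts/filter_duplicates.py | combine_colors
-- ===== SOURCE A (Python) =====
-- from typing import Dict, List, Any
--
-- def extract_individual_colors(color_value: Any) -> List[str]:
--     """Extract individual colors from a color value (handles strings, lists, comma-separated strings)"""
--     if not color_value:
--         return []
--
--     colors = []
--
--     if isinstance(color_value, list):
--         # If it's already a list, process each item
--         for item in color_value:
--             if item:
--                 item_str = str(item).strip()
--                 # Split if comma-separated
--                 if ',' in item_str:
--                     colors.extend([c.strip() for c in item_str.split(',') if c.strip()])
--                 else:
--                     colors.append(item_str)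
--     else:
--         # It's a string (or other type)
--         color_str = str(color_value).strip()
--         if ',' in color_str:
--             # Split comma-separated string
--             colors.extend([c.strip() for c in color_str.split(',') if c.strip()])
--         else:
--             colors.append(color_str)
--
--     return colors
--
-- def combine_colors(colors: List[Any]) -> str:
--     """Combine multiple colors into a comma-separated string, removing duplicates"""
--     # First, extract all individual colors from each color value
--     all_colors = []
--     for color in colors:
--         all_colors.extend(extract_individual_colors(color))
--
--     # Remove duplicates (case-insensitive) while preserving order
--     unique_colors = []
--     seen_lower = set()
--
--     for color in all_colors:
--         color_lower = color.lower().strip()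
--         if color_lower and color_lower not in seen_lower:
--             unique_colors.append(color.strip())
--             seen_lower.add(color_lower)
--
--     return ', '.join(unique_colors) if unique_colors else None
-- ===== SOURCE B (Python) =====
-- from typing import List, Any
--
-- def combine_colors(colors: List[Any]) -> str:
--     """Combine multiple colors into a comma-separated string, removing duplicates"""
--     seen = set()
--     result = []
--     for color in colors:
--         for tok in str(color).strip().split(','):
--             t = tok.strip()
--             key = t.lower()
--             if key and key not in seen:
--                 seen.add(key)
--                 result.append(t)
--     return ', '.join(result) if result else None
-- ===== Notes on version B (the rewrite author's own statement) =====
-- stated objective: simpler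
-- what changed: B replaces A's helper-based two-phase pipeline (build an all_colors list via extract_individual_colors with separate list/comma/no-comma branches, then a second dedup pass) with one fused pass that unconditionally splits each stripped value on commas and dedups tokens on their lowercased key as they are produced, building no intermediate list.
import Mathlib
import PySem

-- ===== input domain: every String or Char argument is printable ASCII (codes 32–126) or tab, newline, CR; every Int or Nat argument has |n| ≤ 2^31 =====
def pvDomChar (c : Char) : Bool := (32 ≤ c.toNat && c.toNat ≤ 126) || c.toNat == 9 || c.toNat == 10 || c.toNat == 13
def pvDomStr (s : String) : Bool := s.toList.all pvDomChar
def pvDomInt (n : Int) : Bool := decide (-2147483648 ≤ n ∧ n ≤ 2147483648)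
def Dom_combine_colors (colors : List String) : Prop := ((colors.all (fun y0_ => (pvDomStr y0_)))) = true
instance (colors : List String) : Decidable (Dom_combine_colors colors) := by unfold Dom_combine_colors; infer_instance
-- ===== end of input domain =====

-- B fuses A's extract-then-dedup pipeline into one pass that splits every stripped value on commas; same return value, simpler shape.

-- ===== PORT A =====
-- extract_individual_colors, specialised to string inputs (the Lean argument type is String,
-- so the isinstance(list) branch of the Python can never fire and is not ported).
def pvExtract (s : List Char) : List (List Char) :=
  if s = [] then []
  else
    let color_str := PySem.Chars.strip s
    if PySem.Chars.isIn [','] color_str then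
      ((PySem.Chars.splitOn color_str [',']).map PySem.Chars.strip).filter (fun c => c ≠ [])
    else [color_str]

-- the body of A's dedup loop (state = (seen_lower, unique_colors))
def pvStepA (p : PySem.Set (List Char) × List (List Char)) (c : List Char) :
    PySem.Set (List Char) × List (List Char) :=
  let color_lower := PySem.Chars.strip (PySem.Chars.lower c)
  if color_lower ≠ [] ∧ PySem.Set.contains p.1 color_lower = false then
    (PySem.Set.add p.1 color_lower, p.2 ++ [PySem.Chars.strip c])
  else p

def combine_colors (colors : List String) : Option String :=
  let all_colors := colors.foldl (fun acc color => acc ++ pvExtract color.toList) []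
  let st := all_colors.foldl pvStepA (PySem.Set.empty, [])
  if st.2 = [] then none else some (String.ofList (PySem.Chars.join [',', ' '] st.2))

-- ===== PORT B =====
-- the body of B's inner loop over the comma-split tokens
def pvStepB (q : PySem.Set (List Char) × List (List Char)) (tok : List Char) :
    PySem.Set (List Char) × List (List Char) :=
  let t := PySem.Chars.strip tok
  let key := PySem.Chars.lower t
  if key ≠ [] ∧ PySem.Set.contains q.1 key = false then (PySem.Set.add q.1 key, q.2 ++ [t])
  else q

def combine_colors_alt (colors : List String) : Option String :=
  let st := colors.foldl
    (fun q color => (PySem.Chars.splitOn (PySem.Chars.strip color.toList) [',']).foldl pvStepB q)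
    (PySem.Set.empty, [])
  if st.2 = [] then none else some (String.ofList (PySem.Chars.join [',', ' '] st.2))

-- ===== PRECONDITION & SPEC =====
def Spec_combine_colors (colors : List String) (out : Option String) : Prop := out = combine_colors_alt colors
instance (colors : List String) (out : Option String) : Decidable (Spec_combine_colors colors out) := by unfold Spec_combine_colors; infer_instance

-- ===== CLAIM (what is proved, stated in full; the proofs are below) =====
def Claim_equal_combine_colors : Prop := ∀ (colors : List String), Dom_combine_colors colors → Spec_combine_colors colors (combine_colors colors)

-- ===== LEMMAS AND PROOFS =====

-- lowerChar maps no character to or from whitespace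
theorem pvIsspaceLowerChar (c : Char) :
    PySem.Chars.isspace (PySem.Chars.lowerChar c) = PySem.Chars.isspace c := by
  unfold PySem.Chars.lowerChar
  by_cases hU : PySem.Chars.isupper c = true
  · rw [if_pos hU]
    have h : 65 ≤ c.toNat ∧ c.toNat ≤ 90 := by
      unfold PySem.Chars.isupper at hU
      simpa using hU
    have hv : (c.toNat + 32).isValidChar := Or.inl (by omega)
    have ht : (Char.ofNat (c.toNat + 32)).toNat = c.toNat + 32 := by
      rw [Char.ofNat, dif_pos hv]; rfl
    have hA : PySem.Chars.isspace c = false := by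
      unfold PySem.Chars.isspace
      simp only [Bool.or_eq_false_iff, Bool.and_eq_false_iff, decide_eq_false_iff_not]
      omega
    have hB : PySem.Chars.isspace (Char.ofNat (c.toNat + 32)) = false := by
      unfold PySem.Chars.isspace
      simp only [ht, Bool.or_eq_false_iff, Bool.and_eq_false_iff, decide_eq_false_iff_not]
      omega
    rw [hA, hB]
  · rw [if_neg hU]

theorem pvLowerPredEq : (PySem.Chars.isspace ∘ PySem.Chars.lowerChar) = PySem.Chars.isspace :=
  funext pvIsspaceLowerChar

theorem pvLstripLower (x : List Char) :
    PySem.Chars.lstrip (PySem.Chars.lower x) = PySem.Chars.lower (PySem.Chars.lstrip x) := by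
  simp [PySem.Chars.lstrip, PySem.Chars.lower, List.dropWhile_map, pvLowerPredEq]

theorem pvRstripLower (x : List Char) :
    PySem.Chars.rstrip (PySem.Chars.lower x) = PySem.Chars.lower (PySem.Chars.rstrip x) := by
  simp [PySem.Chars.rstrip, PySem.Chars.lower, ← List.map_reverse, List.dropWhile_map, pvLowerPredEq]

theorem pvStripLower (x : List Char) :
    PySem.Chars.strip (PySem.Chars.lower x) = PySem.Chars.lower (PySem.Chars.strip x) := by
  simp [PySem.Chars.strip, pvLstripLower, pvRstripLower]

theorem pvDropWhileIdem (p : Char → Bool) (l : List Char) :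
    List.dropWhile p (List.dropWhile p l) = List.dropWhile p l := by
  induction l with
  | nil => rfl
  | cons a t ih => by_cases h : p a <;> simp [h, ih]

theorem pvPrefixDrop (p : Char → Bool) {l' l : List Char} (hp : l' <+: l)
    (h : List.dropWhile p l = l) : List.dropWhile p l' = l' := by
  rw [List.dropWhile_eq_self_iff] at h ⊢
  intro hl
  have hlen : 0 < l.length := lt_of_lt_of_le hl hp.length_le
  have h0 : l'[0] = l[0] := hp.getElem hl
  rw [h0]
  exact h hlen

theorem pvRstripIdem (y : List Char) :
    PySem.Chars.rstrip (PySem.Chars.rstrip y) = PySem.Chars.rstrip y := by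
  simp [PySem.Chars.rstrip, List.reverse_reverse, pvDropWhileIdem]

theorem pvStripIdem (x : List Char) :
    PySem.Chars.strip (PySem.Chars.strip x) = PySem.Chars.strip x := by
  show PySem.Chars.rstrip (PySem.Chars.lstrip (PySem.Chars.rstrip (PySem.Chars.lstrip x)))
      = PySem.Chars.rstrip (PySem.Chars.lstrip x)
  have hy : List.dropWhile PySem.Chars.isspace (PySem.Chars.lstrip x) = PySem.Chars.lstrip x :=
    pvDropWhileIdem _ x
  have hpre : PySem.Chars.rstrip (PySem.Chars.lstrip x) <+: PySem.Chars.lstrip x := by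
    have h2 := List.reverse_prefix.mpr
      (List.dropWhile_suffix (l := (PySem.Chars.lstrip x).reverse) PySem.Chars.isspace)
    simpa [PySem.Chars.rstrip] using h2
  have hls : PySem.Chars.lstrip (PySem.Chars.rstrip (PySem.Chars.lstrip x))
      = PySem.Chars.rstrip (PySem.Chars.lstrip x) := pvPrefixDrop _ hpre hy
  rw [hls, pvRstripIdem]

theorem pvStripNil : PySem.Chars.strip ([] : List Char) = [] := rfl

-- splitting a comma-free list on ',' yields one piece
theorem pvSplitGoNoComma (fuel : Nat) (l cur : List Char) (acc : List (List Char))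
    (h : ',' ∉ l) :
    PySem.Chars.splitOn.go [','] fuel l cur acc = ((cur.reverse ++ l) :: acc).reverse := by
  induction fuel generalizing l cur acc with
  | zero => rw [PySem.Chars.splitOn.go]
  | succ n ih =>
    cases l with
    | nil =>
      rw [PySem.Chars.splitOn.go]
      simp
      omega
    | cons c rest =>
      have hc : c ≠ ',' := fun e => h (e ▸ List.mem_cons_self)
      have hpre : List.isPrefixOf [','] (c :: rest) = false := by
        simp [List.isPrefixOf]
        exact fun e => absurd e.symm hc
      rw [PySem.Chars.splitOn.go]
      simp only [hpre, Bool.false_eq_true, if_false]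
      rw [ih rest (c :: cur) acc (fun hm => h (List.mem_cons_of_mem _ hm))]
      simp

theorem pvSplitNoComma (cs : List Char) (h : ',' ∉ cs) :
    PySem.Chars.splitOn cs [','] = [cs] := by
  simp [PySem.Chars.splitOn, pvSplitGoNoComma _ _ _ _ h]

theorem pvStepBA (q : PySem.Set (List Char) × List (List Char)) (tok : List Char) :
    pvStepB q tok = pvStepA q (PySem.Chars.strip tok) := by
  simp [pvStepA, pvStepB, pvStripLower, pvStripIdem]

theorem pvStepA_nil (p : PySem.Set (List Char) × List (List Char)) : pvStepA p [] = p := by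
  simp [pvStepA, PySem.Chars.strip, PySem.Chars.lower, PySem.Chars.lstrip, PySem.Chars.rstrip]

-- per-string fusion: A's dedup fold over extract_individual_colors(s) equals B's inner loop
theorem pvPerString (s : List Char) (p : PySem.Set (List Char) × List (List Char)) :
    (pvExtract s).foldl pvStepA p
      = (PySem.Chars.splitOn (PySem.Chars.strip s) [',']).foldl pvStepB p := by
  by_cases hs : s = []
  · subst hs
    rw [pvStripNil, pvSplitNoComma [] (by simp)]
    simp [pvExtract, List.foldl, pvStepBA, pvStripNil, pvStepA_nil]
  · unfold pvExtract
    rw [if_neg hs]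
    by_cases hc : PySem.Chars.isIn [','] (PySem.Chars.strip s) = true
    · simp only [hc, if_true]
      calc List.foldl pvStepA p
            (((PySem.Chars.splitOn (PySem.Chars.strip s) [',']).map PySem.Chars.strip).filter
              (fun c => c ≠ []))
          = List.foldl (fun acc x => if x ≠ [] then pvStepA acc x else acc) p
              ((PySem.Chars.splitOn (PySem.Chars.strip s) [',']).map PySem.Chars.strip) :=
            (PySem.List.foldl_ite_eq_foldl_filter _ _ _ _).symm
        _ = List.foldl pvStepA p
              ((PySem.Chars.splitOn (PySem.Chars.strip s) [',']).map PySem.Chars.strip) :=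
            PySem.List.foldl_congr_mem _ _ _ _ (fun acc x _ => by
              by_cases hx : x = []
              · subst hx; simp [pvStepA_nil]
              · rw [if_pos hx])
        _ = List.foldl (fun q t => pvStepA q (PySem.Chars.strip t)) p
              (PySem.Chars.splitOn (PySem.Chars.strip s) [',']) := List.foldl_map
        _ = List.foldl pvStepB p (PySem.Chars.splitOn (PySem.Chars.strip s) [',']) :=
            PySem.List.foldl_congr_mem _ _ _ _ (fun acc x _ => (pvStepBA acc x).symm)
    · simp only [hc, Bool.false_eq_true, if_false]
      have hni : ¬ [','] <:+: PySem.Chars.strip s :=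
        (PySem.Chars.isIn_eq_false_iff _ _).mp (Bool.eq_false_iff.mpr hc)
      have hmem : ',' ∉ PySem.Chars.strip s := by
        intro hm
        obtain ⟨pre, suf, hps⟩ := List.append_of_mem hm
        exact hni ⟨pre, suf, by rw [hps]; simp⟩
      rw [pvSplitNoComma _ hmem]
      simp [List.foldl, pvStepBA, pvStripIdem]

theorem pvFoldFlat (colors : List String) (p : PySem.Set (List Char) × List (List Char)) :
    (colors.flatMap (fun c => pvExtract c.toList)).foldl pvStepA p
      = colors.foldl (fun q c => (pvExtract c.toList).foldl pvStepA q) p := by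
  induction colors generalizing p with
  | nil => rfl
  | cons c t ih => simp [List.flatMap_cons, List.foldl_append, ih]

-- ===== VERDICT (by name: the statement is the Claim_ definition above) =====
theorem combine_colors_spec : Claim_equal_combine_colors := by
  intro colors _
  show combine_colors colors = combine_colors_alt colors
  have hst : (colors.foldl (fun acc color => acc ++ pvExtract color.toList) []).foldl pvStepA
        (PySem.Set.empty, [])
      = colors.foldl
        (fun q color => (PySem.Chars.splitOn (PySem.Chars.strip color.toList) [',']).foldl pvStepB q)
        (PySem.Set.empty, []) := by
    rw [PySem.List.foldl_append_eq_flatMap, List.nil_append, pvFoldFlat]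
    exact PySem.List.foldl_congr_mem _ _ _ _ (fun acc (x : String) _ => pvPerString x.toList acc)
  simp only [combine_colors, combine_colors_alt, hst]
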